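-- pv_equiv track=rewrite | github.com/fire3/aida-audit | backend/aida_cli/microcode/utils.py | get_opcode_category
-- ===== SOURCE A (Python) =====
-- def get_opcode_category(opcode_name: str) -> str:
--     name = (opcode_name or "").lower()
--     if not name:
--         return ""
--     if "call" in name:
--         return "call"
--     if name in ("jmp", "goto"):
--         return "jump"
--     if name.startswith("j"):
--         return "branch"
--     if name in ("mov", "xdu", "xds", "cast"):
--         return "move"
--     if name in ("ldx", "stx", "ld", "st"):
--         return "memory"
--     if name in ("and", "or", "xor", "not", "test", "tst"):
--         return "logic"
--     if name in ("add", "sub", "mul", "div", "mod", "neg", "udiv", "sdiv", "umod", "smod", "shl", "shr", "sar", "rol", "ror", "udiv", "sdiv", "umul", "smul", "udivmod", "sdivmod"):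
--         return "arith"
--     if name in ("fadd", "fsub", "fmul", "fdiv", "fneg", "f2i", "i2f", "f2f", "fcmp", "f2u", "u2f", "ftoi", "itof", "fptosi", "fptoui"):
--         return "float"
--     if name.startswith("v") and any(k in name for k in ("add", "sub", "mul", "div", "mov", "shl", "shr", "and", "or", "xor", "cmp")):
--         return "vector"
--     if name in ("cmp", "tst", "set", "sets", "setb", "seta", "setz", "setnz"):
--         return "cmp"
--     if name in ("ret", "leave"):
--         return "ret"
--     if name.startswith("f"):
--         return "float"
--     return ""
-- ===== SOURCE B (Python) =====
-- # B: a first-character decision tree (grouped by spelling, not by category);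
-- # only the intrinsic call-substring, j-/v- prefix and vector-keyword rules stay.
-- _VEC = ("add", "sub", "mul", "div", "mov", "shl", "shr", "and", "or", "xor", "cmp")
--
--
-- def get_opcode_category(opcode_name: str) -> str:
--     name = (opcode_name or "").lower()
--     if not name:
--         return ""
--     if "call" in name:
--         return "call"
--     c = name[0]
--     if c == "f":
--         return "float"
--     if c == "j":
--         return "jump" if name == "jmp" else "branch"
--     if c == "v":
--         return "vector" if any(k in name for k in _VEC) else ""
--     if c == "a":
--         return "arith" if name == "add" else "logic" if name == "and" else ""
--     if c == "c":
--         return "move" if name == "cast" else "cmp" if name == "cmp" else ""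
--     if c == "d":
--         return "arith" if name == "div" else ""
--     if c == "g":
--         return "jump" if name == "goto" else ""
--     if c == "i":
--         return "float" if name in ("i2f", "itof") else ""
--     if c == "l":
--         return "memory" if name in ("ld", "ldx") else "ret" if name == "leave" else ""
--     if c == "m":
--         return "move" if name == "mov" else "arith" if name in ("mul", "mod") else ""
--     if c == "n":
--         return "logic" if name == "not" else "arith" if name == "neg" else ""
--     if c == "o":
--         return "logic" if name == "or" else ""
--     if c == "r":
--         return "arith" if name in ("rol", "ror") else "ret" if name == "ret" else ""
--     if c == "s":
--         if name in ("st", "stx"):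
--             return "memory"
--         if name in ("sub", "sdiv", "smod", "shl", "shr", "sar", "smul", "sdivmod"):
--             return "arith"
--         if name in ("set", "sets", "setb", "seta", "setz", "setnz"):
--             return "cmp"
--         return ""
--     if c == "t":
--         return "logic" if name in ("test", "tst") else ""
--     if c == "u":
--         return "arith" if name in ("udiv", "umod", "umul", "udivmod") else "float" if name == "u2f" else ""
--     if c == "x":
--         return "move" if name in ("xdu", "xds") else "logic" if name == "xor" else ""
--     return ""
-- ===== Notes on version B (the rewrite author's own statement) =====
-- stated objective: alternative
-- what changed: B classifies by a first-character decision tree (dispatch on name[0], then a few exact comparisons per letter, grouped by spelling), instead of A's precedence chain of per-category tuple-membership tests; only the intrinsic call-substring, j-prefix and v+keyword rules remain as in A.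
import Mathlib
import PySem

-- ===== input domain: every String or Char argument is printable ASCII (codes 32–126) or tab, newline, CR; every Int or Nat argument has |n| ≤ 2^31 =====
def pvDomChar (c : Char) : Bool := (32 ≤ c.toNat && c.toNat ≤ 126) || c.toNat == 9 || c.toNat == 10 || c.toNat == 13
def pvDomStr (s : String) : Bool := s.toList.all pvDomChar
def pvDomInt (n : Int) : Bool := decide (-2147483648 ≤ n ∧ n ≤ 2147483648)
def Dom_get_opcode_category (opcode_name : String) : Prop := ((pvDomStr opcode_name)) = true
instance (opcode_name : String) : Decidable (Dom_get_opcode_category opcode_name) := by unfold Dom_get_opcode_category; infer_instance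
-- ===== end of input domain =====

-- B classifies by a first-character decision tree (dispatch on name[0], then a few
-- exact comparisons per letter) instead of A's precedence chain of per-category
-- tuple-membership tests.

-- ===== PORT A =====
def get_opcode_category (opcode_name : String) : String :=
  let name := PySem.Str.lower opcode_name
  if name = "" then ""
  else if PySem.Str.isIn "call" name then "call"
  else if name ∈ (["jmp", "goto"] : List String) then "jump"
  else if PySem.Str.startswith name "j" then "branch"
  else if name ∈ (["mov", "xdu", "xds", "cast"] : List String) then "move"
  else if name ∈ (["ldx", "stx", "ld", "st"] : List String) then "memory"
  else if name ∈ (["and", "or", "xor", "not", "test", "tst"] : List String) then "logic"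
  else if name ∈ (["add", "sub", "mul", "div", "mod", "neg", "udiv", "sdiv", "umod", "smod", "shl", "shr", "sar", "rol", "ror", "udiv", "sdiv", "umul", "smul", "udivmod", "sdivmod"] : List String) then "arith"
  else if name ∈ (["fadd", "fsub", "fmul", "fdiv", "fneg", "f2i", "i2f", "f2f", "fcmp", "f2u", "u2f", "ftoi", "itof", "fptosi", "fptoui"] : List String) then "float"
  else if PySem.Str.startswith name "v" ∧ (["add", "sub", "mul", "div", "mov", "shl", "shr", "and", "or", "xor", "cmp"] : List String).any (fun k => PySem.Str.isIn k name) then "vector"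
  else if name ∈ (["cmp", "tst", "set", "sets", "setb", "seta", "setz", "setnz"] : List String) then "cmp"
  else if name ∈ (["ret", "leave"] : List String) then "ret"
  else if PySem.Str.startswith name "f" then "float"
  else ""

-- ===== PORT B =====
def pvVecKeys : List String := ["add", "sub", "mul", "div", "mov", "shl", "shr", "and", "or", "xor", "cmp"]

def get_opcode_category_alt (opcode_name : String) : String :=
  let name := PySem.Str.lower opcode_name
  if name = "" then ""
  else if PySem.Str.isIn "call" name then "call"
  else
    match PySem.Str.pyGet? name 0 with  -- name[0]; 'none' unreachable (name ≠ "")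
    | none => ""
    | some c =>
      if c = 'f' then "float"
      else if c = 'j' then (if name = "jmp" then "jump" else "branch")
      else if c = 'v' then (if pvVecKeys.any (fun k => PySem.Str.isIn k name) then "vector" else "")
      else if c = 'a' then (if name = "add" then "arith" else if name = "and" then "logic" else "")
      else if c = 'c' then (if name = "cast" then "move" else if name = "cmp" then "cmp" else "")
      else if c = 'd' then (if name = "div" then "arith" else "")
      else if c = 'g' then (if name = "goto" then "jump" else "")
      else if c = 'i' then (if name ∈ (["i2f", "itof"] : List String) then "float" else "")
      else if c = 'l' then (if name ∈ (["ld", "ldx"] : List String) then "memory" else if name = "leave" then "ret" else "")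
      else if c = 'm' then (if name = "mov" then "move" else if name ∈ (["mul", "mod"] : List String) then "arith" else "")
      else if c = 'n' then (if name = "not" then "logic" else if name = "neg" then "arith" else "")
      else if c = 'o' then (if name = "or" then "logic" else "")
      else if c = 'r' then (if name ∈ (["rol", "ror"] : List String) then "arith" else if name = "ret" then "ret" else "")
      else if c = 's' then
        (if name ∈ (["st", "stx"] : List String) then "memory"
         else if name ∈ (["sub", "sdiv", "smod", "shl", "shr", "sar", "smul", "sdivmod"] : List String) then "arith"
         else if name ∈ (["set", "sets", "setb", "seta", "setz", "setnz"] : List String) then "cmp"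
         else "")
      else if c = 't' then (if name ∈ (["test", "tst"] : List String) then "logic" else "")
      else if c = 'u' then (if name ∈ (["udiv", "umod", "umul", "udivmod"] : List String) then "arith" else if name = "u2f" then "float" else "")
      else if c = 'x' then (if name ∈ (["xdu", "xds"] : List String) then "move" else if name = "xor" then "logic" else "")
      else ""

-- ===== PRECONDITION & SPEC =====
def Spec_get_opcode_category (opcode_name : String) (out : String) : Prop := out = get_opcode_category_alt opcode_name
instance (opcode_name : String) (out : String) : Decidable (Spec_get_opcode_category opcode_name out) := by unfold Spec_get_opcode_category; infer_instance

-- ===== CLAIM (what is proved, stated in full; the proofs are below) =====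
def Claim_equal_get_opcode_category : Prop := ∀ (opcode_name : String), Dom_get_opcode_category opcode_name → Spec_get_opcode_category opcode_name (get_opcode_category opcode_name)

-- ===== LEMMAS AND PROOFS =====

-- startswith with a single-character prefix tests the first character
lemma sw_single (name : String) (c : Char) (t : List Char) (hn : name.toList = c :: t)
    (a : Char) (p : String) (hp : p.toList = [a]) :
    PySem.Str.startswith name p = decide (c = a) := by
  rw [PySem.Str.startswith_eq, hp, hn]
  by_cases h : c = a
  · subst h; simp [PySem.Chars.startswith_iff]
  · simp only [h, decide_false]
    rw [Bool.eq_false_iff]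
    intro hc
    rw [PySem.Chars.startswith_iff] at hc
    rcases hc with ⟨r, hr⟩
    simp at hr
    exact h hr.1.symm

lemma toList_cons_of_ne (name : String) (hne : ¬ name = "") :
    ∃ c t, name.toList = c :: t := by
  cases h : name.toList with
  | nil => exact absurd (by simpa using congrArg String.ofList h) hne
  | cons c t => exact ⟨c, t, rfl⟩

-- ===== VERDICT (by name: the statement is the Claim_ definition above) =====
set_option maxHeartbeats 3200000 in
theorem get_opcode_category_spec : Claim_equal_get_opcode_category := by
  intro s _
  unfold Spec_get_opcode_category
  simp only [get_opcode_category, get_opcode_category_alt]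
  generalize PySem.Str.lower s = name
  by_cases h0 : name = ""
  · rw [if_pos h0, if_pos h0]
  rw [if_neg h0, if_neg h0]
  by_cases hc : PySem.Str.isIn "call" name = true
  · rw [if_pos hc, if_pos hc]
  rw [if_neg hc, if_neg hc]
  obtain ⟨c, t, hn⟩ := toList_cons_of_ne name h0
  have pg : PySem.Str.pyGet? name 0 = some c := by
    rw [show ((0:Int)) = ((0:Nat):Int) from rfl, PySem.Str.pyGet?_natCast, hn]; rfl
  have pg2 : PySem.List.pyGet? name.toList 0 = some c := by
    rw [hn]; simp [PySem.List.pyGet?, PySem.List.pyIdx?]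
  have swj := sw_single name c t hn 'j' "j" rfl
  have swv := sw_single name c t hn 'v' "v" rfl
  have swf := sw_single name c t hn 'f' "f" rfl
  by_cases c1 : name ∈ (["jmp", "goto"] : List String)
  · rw [if_pos c1]
    simp only [List.mem_cons, List.not_mem_nil, or_false] at c1
    rcases c1 with rfl | rfl <;> decide
  rw [if_neg c1]
  by_cases c2 : PySem.Str.startswith name "j" = true
  · rw [if_pos c2]
    have hcj : c = 'j' := of_decide_eq_true (swj ▸ c2)
    subst hcj
    have h1 : ¬ name = "jmp" := by rintro rfl; simp at c1
    simp [pg2, h1]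
  rw [if_neg c2]
  by_cases c3 : name ∈ (["mov", "xdu", "xds", "cast"] : List String)
  · rw [if_pos c3]
    simp only [List.mem_cons, List.not_mem_nil, or_false] at c3
    rcases c3 with rfl | rfl | rfl | rfl <;> decide
  rw [if_neg c3]
  by_cases c4 : name ∈ (["ldx", "stx", "ld", "st"] : List String)
  · rw [if_pos c4]
    simp only [List.mem_cons, List.not_mem_nil, or_false] at c4
    rcases c4 with rfl | rfl | rfl | rfl <;> decide
  rw [if_neg c4]
  by_cases c5 : name ∈ (["and", "or", "xor", "not", "test", "tst"] : List String)
  · rw [if_pos c5]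
    simp only [List.mem_cons, List.not_mem_nil, or_false] at c5
    rcases c5 with rfl | rfl | rfl | rfl | rfl | rfl <;> decide
  rw [if_neg c5]
  by_cases c6 : name ∈ (["add", "sub", "mul", "div", "mod", "neg", "udiv", "sdiv", "umod", "smod", "shl", "shr", "sar", "rol", "ror", "udiv", "sdiv", "umul", "smul", "udivmod", "sdivmod"] : List String)
  · rw [if_pos c6]
    simp only [List.mem_cons, List.not_mem_nil, or_false] at c6
    rcases c6 with rfl | rfl | rfl | rfl | rfl | rfl | rfl | rfl | rfl | rfl | rfl | rfl | rfl | rfl | rfl | rfl | rfl | rfl | rfl | rfl | rfl <;> decide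
  rw [if_neg c6]
  by_cases c7 : name ∈ (["fadd", "fsub", "fmul", "fdiv", "fneg", "f2i", "i2f", "f2f", "fcmp", "f2u", "u2f", "ftoi", "itof", "fptosi", "fptoui"] : List String)
  · rw [if_pos c7]
    simp only [List.mem_cons, List.not_mem_nil, or_false] at c7
    rcases c7 with rfl | rfl | rfl | rfl | rfl | rfl | rfl | rfl | rfl | rfl | rfl | rfl | rfl | rfl | rfl <;> decide
  rw [if_neg c7]
  by_cases c8 : PySem.Str.startswith name "v" = true ∧ ((["add", "sub", "mul", "div", "mov", "shl", "shr", "and", "or", "xor", "cmp"] : List String).any (fun k => PySem.Str.isIn k name)) = true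
  · rw [if_pos c8]
    have hcv : c = 'v' := of_decide_eq_true (swv ▸ c8.1)
    subst hcv
    simp only [pg]
    rw [if_neg (by decide : ¬ ('v':Char) = 'f'), if_neg (by decide : ¬ ('v':Char) = 'j'), if_pos (trivial : True),
        if_pos (show (pvVecKeys.any (fun k => PySem.Str.isIn k name)) = true from c8.2)]
  rw [if_neg c8]
  by_cases c9 : name ∈ (["cmp", "tst", "set", "sets", "setb", "seta", "setz", "setnz"] : List String)
  · rw [if_pos c9]
    simp only [List.mem_cons, List.not_mem_nil, or_false] at c9
    rcases c9 with rfl | rfl | rfl | rfl | rfl | rfl | rfl | rfl <;> first | rfl | decide | simp_all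
  rw [if_neg c9]
  by_cases c10 : name ∈ (["ret", "leave"] : List String)
  · rw [if_pos c10]
    simp only [List.mem_cons, List.not_mem_nil, or_false] at c10
    rcases c10 with rfl | rfl <;> decide
  rw [if_neg c10]
  by_cases c11 : PySem.Str.startswith name "f" = true
  · rw [if_pos c11]
    have hcf : c = 'f' := of_decide_eq_true (swf ▸ c11)
    subst hcf
    simp [pg2]
  rw [if_neg c11]
  have hcf : ¬ c = 'f' := fun h => c11 (swf.trans (by simp [h]))
  have hcj : ¬ c = 'j' := fun h => c2 (swj.trans (by simp [h]))
  have hvec : c = 'v' → ¬ (pvVecKeys.any (fun k => PySem.Str.isIn k name)) = true := by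
    intro h ha
    exact c8 ⟨swv.trans (by simp [h]), ha⟩
  simp only [List.mem_cons, List.not_mem_nil, or_false] at c1 c3 c4 c5 c6 c7 c9 c10
  push Not at c1 c3 c4 c5 c6 c7 c9 c10
  simp only [pg]; rw [if_neg hcf, if_neg hcj]
  by_cases hv : c = 'v'
  · rw [if_pos hv, if_neg (hvec hv)]
  rw [if_neg hv]
  obtain ⟨njmp, ngoto⟩ := c1
  obtain ⟨nmov, nxdu, nxds, ncast⟩ := c3
  obtain ⟨nldx, nstx, nld, nst⟩ := c4
  obtain ⟨nand, nor, nxor, nnot, ntest, ntst⟩ := c5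
  obtain ⟨nadd, nsub, nmul, ndiv, nmod, nneg, nudiv, nsdiv, numod, nsmod, nshl, nshr, nsar, nrol, nror, _, _, numul, nsmul, nudivmod, nsdivmod⟩ := c6
  obtain ⟨nfadd, nfsub, nfmul, nfdiv, nfneg, nf2i, ni2f, nf2f, nfcmp, nf2u, nu2f, nftoi, nitof, nfptosi, nfptoui⟩ := c7
  obtain ⟨ncmp, _, nset, nsets, nsetb, nseta, nsetz, nsetnz⟩ := c9
  obtain ⟨nret, nleave⟩ := c10
  simp only [List.mem_cons, List.not_mem_nil, or_false]
  by_cases ha : c = 'a'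
  · rw [if_pos ha, if_neg nadd, if_neg nand]
  rw [if_neg ha]
  by_cases hcc : c = 'c'
  · rw [if_pos hcc, if_neg ncast, if_neg ncmp]
  rw [if_neg hcc]
  by_cases hd : c = 'd'
  · rw [if_pos hd, if_neg ndiv]
  rw [if_neg hd]
  by_cases hg : c = 'g'
  · rw [if_pos hg, if_neg ngoto]
  rw [if_neg hg]
  by_cases hi : c = 'i'
  · rw [if_pos hi, if_neg (not_or_intro ni2f nitof)]
  rw [if_neg hi]
  by_cases hl : c = 'l'
  · rw [if_pos hl, if_neg (not_or_intro nld nldx), if_neg nleave]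
  rw [if_neg hl]
  by_cases hm : c = 'm'
  · rw [if_pos hm, if_neg nmov, if_neg (not_or_intro nmul nmod)]
  rw [if_neg hm]
  by_cases hnn : c = 'n'
  · rw [if_pos hnn, if_neg nnot, if_neg nneg]
  rw [if_neg hnn]
  by_cases ho : c = 'o'
  · rw [if_pos ho, if_neg nor]
  rw [if_neg ho]
  by_cases hr : c = 'r'
  · rw [if_pos hr, if_neg (not_or_intro nrol nror), if_neg nret]
  rw [if_neg hr]
  by_cases hs : c = 's'
  · rw [if_pos hs, if_neg (not_or_intro nst nstx),
        if_neg (not_or_intro nsub (not_or_intro nsdiv (not_or_intro nsmod (not_or_intro nshl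
          (not_or_intro nshr (not_or_intro nsar (not_or_intro nsmul nsdivmod))))))),
        if_neg (not_or_intro nset (not_or_intro nsets (not_or_intro nsetb (not_or_intro nseta
          (not_or_intro nsetz nsetnz)))))]
  rw [if_neg hs]
  by_cases ht : c = 't'
  · rw [if_pos ht, if_neg (not_or_intro ntest ntst)]
  rw [if_neg ht]
  by_cases hu : c = 'u'
  · rw [if_pos hu, if_neg (not_or_intro nudiv (not_or_intro numod (not_or_intro numul nudivmod))),
        if_neg nu2f]
  rw [if_neg hu]
  by_cases hx : c = 'x'
  · rw [if_pos hx, if_neg (not_or_intro nxdu nxds), if_neg nxor]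
  rw [if_neg hx]
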